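-- pv_equiv track=rewrite | github.com/tylermillan/DataStructures | Problems/WordCollage.py | collage
-- ===== SOURCE A (Python) =====
-- def collage(x,y): #When passed a list of words x, checks if the list y is possible to be created out of x
--     magazine = {}
--     for i in x:
--         if i in magazine == False:
--             magazine[i] = 1
--         else:
--             magazine[i] = magazine.get(i,0) + 1
--     for j in y:
--         if j not in magazine or magazine[j]==0:
--             return "NO"
--         else:
--              magazine[j] = magazine.get(j,0) - 1
--     return "YES"
-- ===== SOURCE B (Python) =====
-- def collage(x, y):
--     # Buildable iff every distinct word of y occurs at least as often in x.
--     return "YES" if all(y.count(j) <= x.count(j) for j in set(y)) else "NO"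
-- ===== Notes on version B (the rewrite author's own statement) =====
-- stated objective: simpler
-- what changed: Replaces A's build-a-dict-then-decrement-with-early-exit pass by a direct multiset-inclusion check: for each distinct word of y, compare its count in y with its count in x.
import Mathlib
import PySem

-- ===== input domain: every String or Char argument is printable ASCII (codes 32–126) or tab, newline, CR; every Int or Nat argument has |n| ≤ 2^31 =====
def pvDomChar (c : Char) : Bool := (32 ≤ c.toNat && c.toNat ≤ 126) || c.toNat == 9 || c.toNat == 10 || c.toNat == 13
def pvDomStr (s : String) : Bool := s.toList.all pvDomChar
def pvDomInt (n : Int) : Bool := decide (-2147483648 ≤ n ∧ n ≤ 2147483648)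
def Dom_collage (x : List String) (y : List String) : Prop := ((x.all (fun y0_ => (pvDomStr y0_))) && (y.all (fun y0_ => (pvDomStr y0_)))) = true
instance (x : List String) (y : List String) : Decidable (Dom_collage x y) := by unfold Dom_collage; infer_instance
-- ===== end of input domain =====

-- ===== PORT A =====
-- first loop: 'if i in magazine == False' is Python chained comparison
-- '(i in magazine) and (magazine == False)'; a dict never equals False, so the test is always false
def collageBuild (x : List String) : PySem.Dict String Int :=
  x.foldl (fun m i =>
    if m.contains i && false then m.insert i 1
    else m.insert i (m.getD i 0 + 1)) PySem.Dict.empty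

-- second loop; 'magazine[j]' is only evaluated when 'j in magazine' holds (or short-circuit), so getD is exact
def collageLoop (m : PySem.Dict String Int) : List String → String
  | [] => "YES"
  | j :: rest =>
    if !(m.contains j) || m.getD j 0 == 0 then "NO"
    else collageLoop (m.insert j (m.getD j 0 - 1)) rest

def collage (x : List String) (y : List String) : String :=
  collageLoop (collageBuild x) y

-- ===== PORT B =====
def collage_alt (x : List String) (y : List String) : String :=
  if (PySem.Set.ofList y).all (fun j => List.count j y ≤ List.count j x) then "YES" else "NO"

-- ===== PRECONDITION & SPEC =====
def Spec_collage (x : List String) (y : List String) (out : String) : Prop := out = collage_alt x y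
instance (x : List String) (y : List String) (out : String) : Decidable (Spec_collage x y out) := by unfold Spec_collage; infer_instance

-- ===== CLAIM (what is proved, stated in full; the proofs are below) =====
def Claim_equal_collage : Prop := ∀ (x : List String) (y : List String), Dom_collage x y → Spec_collage x y (collage x y)

-- ===== LEMMAS AND PROOFS =====

lemma collageBuild_eq (x : List String) :
    collageBuild x = x.foldl (fun d i => d.insert i (d.getD i 0 + 1)) PySem.Dict.empty := by
  simp [collageBuild]

lemma collageBuild_getD (x : List String) (k : String) :
    (collageBuild x).getD k 0 = (x.count k : Int) := by
  rw [collageBuild_eq, PySem.Dict.getD_foldl_insert_add_one]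
  simp

lemma collageBuild_contains (x : List String) (k : String)
    (h : (collageBuild x).getD k 0 ≠ 0) : (collageBuild x).contains k = true := by
  rw [collageBuild_getD] at h
  have hk : k ∈ x := by
    by_contra hk
    exact h (by simp [List.count_eq_zero_of_not_mem hk])
  rw [PySem.Dict.contains_iff_mem_keys, collageBuild_eq, PySem.Dict.keys_foldl_insert,
    PySem.Dict.keys_empty, PySem.Set.update_nil_left]
  exact (PySem.Set.mem_ofList x k).mpr hk

lemma collageLoop_eq (y : List String) : ∀ (m : PySem.Dict String Int),
    (∀ k, 0 ≤ m.getD k 0) → (∀ k, m.getD k 0 ≠ 0 → m.contains k = true) →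
    collageLoop m y = if ∀ k ∈ y, (y.count k : Int) ≤ m.getD k 0 then "YES" else "NO" := by
  induction y with
  | nil => intro m _ _; simp [collageLoop]
  | cons j rest ih =>
    intro m hpos hcont
    by_cases hz : m.getD j 0 = 0
    · rw [collageLoop]
      rw [if_pos (by simp [hz])]
      rw [if_neg]
      intro hall
      have := hall j (by simp)
      rw [hz] at this
      have : (j :: rest).count j = 0 := by omega
      simp [List.count_cons_self] at this
    · have hc := hcont j hz
      have hge : 1 ≤ m.getD j 0 := by have := hpos j; omega
      rw [collageLoop]
      rw [if_neg (by simp [hc, hz])]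
      rw [ih (m.insert j (m.getD j 0 - 1))
        (by intro k; rw [PySem.Dict.getD_insert]; split_ifs with h
            · omega
            · exact hpos k)
        (by intro k hk
            rw [PySem.Dict.getD_insert] at hk
            rw [PySem.Dict.contains_insert]
            split_ifs at hk with h
            · simp [h]
            · simp [hcont k hk])]
      congr 1
      simp only [eq_iff_iff]
      constructor
      · intro hall k hk
        rcases List.mem_cons.mp hk with rfl | hkr
        · have : rest.count k ≤ m.getD k 0 - 1 := by
            by_cases hkrest : k ∈ rest
            · have := hall k hkrest
              rw [PySem.Dict.getD_insert, if_pos rfl] at this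
              exact this
            · simp [List.count_eq_zero_of_not_mem hkrest]; omega
          simp only [List.count_cons_self]
          push_cast
          omega
        · have hx := hall k hkr
          rw [PySem.Dict.getD_insert] at hx
          split_ifs at hx with h
          · subst h
            simp only [List.count_cons_self]; push_cast; omega
          · simpa [List.count_cons, Ne.symm h] using hx
      · intro hall k hk
        have hx := hall k (List.mem_cons_of_mem _ hk)
        rw [PySem.Dict.getD_insert]
        split_ifs with h
        · subst h
          rw [List.count_cons_self] at hx
          push_cast at hx ⊢
          omega
        · simpa [List.count_cons, Ne.symm h] using hx

-- ===== VERDICT (by name: the statement is the Claim_ definition above) =====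
theorem collage_spec : Claim_equal_collage := by
  intro x y _
  show collage x y = collage_alt x y
  rw [collage, collageLoop_eq y (collageBuild x)
    (by intro k; rw [collageBuild_getD]; positivity)
    (fun k => collageBuild_contains x k)]
  rw [collage_alt]
  congr 1
  simp only [eq_iff_iff, List.all_eq_true, decide_eq_true_eq]
  constructor
  · intro h j hj
    have := h j ((PySem.Set.mem_ofList y j).mp hj)
    rw [collageBuild_getD] at this
    exact_mod_cast this
  · intro h k hk
    rw [collageBuild_getD]
    exact_mod_cast h k ((PySem.Set.mem_ofList y k).mpr hk)
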